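-- pv_equiv track=rewrite | github.com/HanxSmile/RayRewardServer | commons/config_loader.py | _unknown_to_dotlist
-- ===== SOURCE A (Python) =====
-- from typing import List, Optional
--
-- def _unknown_to_dotlist(unknown: List[str]) -> List[str]:
--     """把 argparse.parse_known_args() 的 unknown tokens 规范化为 OmegaConf dotlist。
--
--     支持：
--       - key=value
--       - --key=value
--       - --key value
--       - --flag        (等价于 flag=true)
--
--     其中 key 可以是 dotted key（例如 handlers.dummy.num_workers）。
--     """
--     dotlist: List[str] = []
--     i = 0
--     while i < len(unknown):
--         tok = unknown[i]
--
--         # 允许直接传 key=value（OmegaConf/Hydra 风格）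
--         if not tok.startswith("--"):
--             if "=" in tok:
--                 dotlist.append(tok)
--             i += 1
--             continue
--
--         # --key 或 --key=value
--         key = tok[2:]
--         if not key:
--             i += 1
--             continue
--
--         if "=" in key:
--             # --a.b=1 -> a.b=1
--             dotlist.append(key)
--             i += 1
--             continue
--
--         # --key value 或 --flag
--         if i + 1 < len(unknown) and not unknown[i + 1].startswith("--"):
--             dotlist.append(f"{key}={unknown[i + 1]}")
--             i += 2
--         else:
--             dotlist.append(f"{key}=true")
--             i += 1
--
--     return dotlist
-- ===== SOURCE B (Python) =====
-- from typing import List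
--
-- def _unknown_to_dotlist(unknown: List[str]) -> List[str]:
--     """Single pass over tokens carrying a `pending` key instead of index look-ahead."""
--     dotlist: List[str] = []
--     pending = None
--     for tok in unknown:
--         if pending is not None:
--             if not tok.startswith("--"):
--                 dotlist.append(f"{pending}={tok}")
--                 pending = None
--                 continue
--             dotlist.append(f"{pending}=true")
--             pending = None
--         if not tok.startswith("--"):
--             if "=" in tok:
--                 dotlist.append(tok)
--             continue
--         key = tok[2:]
--         if not key:
--             continue
--         if "=" in key:
--             dotlist.append(key)
--         else:
--             pending = key
--     if pending is not None:
--         dotlist.append(f"{pending}=true")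
--     return dotlist
-- ===== Notes on version B (the rewrite author's own statement) =====
-- stated objective: alternative
-- what changed: Replaces A's index-based while loop with i+=2 look-ahead (peeking at unknown[i+1]) by a single token-by-token pass that defers a bare '--key' into a `pending` state, resolving it on the next token or in a final flush.
import Mathlib
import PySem

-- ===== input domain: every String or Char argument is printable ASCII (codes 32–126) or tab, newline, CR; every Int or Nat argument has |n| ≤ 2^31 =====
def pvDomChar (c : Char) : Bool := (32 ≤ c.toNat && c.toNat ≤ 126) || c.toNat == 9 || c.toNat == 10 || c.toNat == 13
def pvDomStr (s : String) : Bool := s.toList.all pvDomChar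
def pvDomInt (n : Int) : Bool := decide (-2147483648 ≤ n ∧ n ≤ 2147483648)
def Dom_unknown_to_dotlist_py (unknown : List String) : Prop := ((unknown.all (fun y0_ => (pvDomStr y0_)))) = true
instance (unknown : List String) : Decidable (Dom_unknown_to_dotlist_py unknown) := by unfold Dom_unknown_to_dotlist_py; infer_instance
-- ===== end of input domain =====

-- ===== PORT A =====
-- B replaces A's index-based while loop with i+=2 look-ahead by a token-by-token fold
-- carrying a `pending` key (objective: alternative decomposition, same cost).
-- f"{key}={v}" (both Pythons build strings only this way)
def pvFstr (key v : String) : String := String.ofList (key.toList ++ '=' :: v.toList)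

-- A's while loop: i is the position, so the loop is recursion on the remaining suffix,
-- with unknown[i+1] read as the head of the tail (match rest) and i += 2 skipping it.
def pvLoopA : List String → List String → List String
  | [], acc => acc
  | tok :: rest, acc =>
    if !(PySem.Str.startswith tok "--") then
      -- key=value style: append only if "=" in tok; i += 1
      pvLoopA rest (if PySem.Str.isIn "=" tok then acc ++ [tok] else acc)
    else
      let key := PySem.Str.slice tok (some 2) none   -- tok[2:]
      if key = "" then pvLoopA rest acc
      else if PySem.Str.isIn "=" key then pvLoopA rest (acc ++ [key])
      else
        -- if i + 1 < len(unknown) and not unknown[i+1].startswith("--")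
        match hr : rest with
        | [] => acc ++ [pvFstr key "true"]
        | next :: rest' =>
          if !(PySem.Str.startswith next "--") then
            pvLoopA rest' (acc ++ [pvFstr key next])          -- i += 2
          else
            pvLoopA rest (acc ++ [pvFstr key "true"])  -- i += 1 (rest = next :: rest')
termination_by l _ => l.length
decreasing_by all_goals ((try subst hr); simp only [List.length_cons]; omega)

def unknown_to_dotlist_py (unknown : List String) : List String :=
  pvLoopA unknown []

-- ===== PORT B =====
-- B: process one token with no pending key
def pvProcB (acc : List String) (tok : String) : List String × Option String :=
  if !(PySem.Str.startswith tok "--") then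
    (if PySem.Str.isIn "=" tok then acc ++ [tok] else acc, none)
  else
    let key := PySem.Str.slice tok (some 2) none   -- tok[2:]
    if key = "" then (acc, none)
    else if PySem.Str.isIn "=" key then (acc ++ [key], none)
    else (acc, some key)

-- B's loop body: first resolve a pending key, then (if still needed) process tok
def pvStepB (st : List String × Option String) (tok : String) : List String × Option String :=
  match st.2 with
  | some key =>
      if !(PySem.Str.startswith tok "--") then (st.1 ++ [pvFstr key tok], none)
      else pvProcB (st.1 ++ [pvFstr key "true"]) tok
  | none => pvProcB st.1 tok

def unknown_to_dotlist_py_alt (unknown : List String) : List String :=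
  let st := unknown.foldl pvStepB ([], none)
  match st.2 with
  | some key => st.1 ++ [pvFstr key "true"]
  | none => st.1

-- ===== PRECONDITION & SPEC =====
def Spec_unknown_to_dotlist_py (unknown : List String) (out : List String) : Prop := out = unknown_to_dotlist_py_alt unknown
instance (unknown : List String) (out : List String) : Decidable (Spec_unknown_to_dotlist_py unknown out) := by unfold Spec_unknown_to_dotlist_py; infer_instance

-- ===== CLAIM (what is proved, stated in full; the proofs are below) =====
def Claim_equal_unknown_to_dotlist_py : Prop := ∀ (unknown : List String), Dom_unknown_to_dotlist_py unknown → Spec_unknown_to_dotlist_py unknown (unknown_to_dotlist_py unknown)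

-- ===== LEMMAS AND PROOFS =====
-- the final flush of B's state
def pvFlush (st : List String × Option String) : List String :=
  match st.2 with
  | some key => st.1 ++ [pvFstr key "true"]
  | none => st.1

-- what A computes after having consumed "--key" (key nonempty, no '=') with l still ahead
def pvLookA (acc : List String) (key : String) : List String → List String
  | [] => acc ++ [pvFstr key "true"]
  | next :: rest =>
    if !(PySem.Str.startswith next "--") then pvLoopA rest (acc ++ [pvFstr key next])
    else pvLoopA (next :: rest) (acc ++ [pvFstr key "true"])

lemma pvLoopA_lookahead (acc : List String) (tok : String) (rest : List String)
    (h1 : PySem.Str.startswith tok "--" = true)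
    (h2 : ¬ PySem.Str.slice tok (some 2) none = "")
    (h3 : PySem.Str.isIn "=" (PySem.Str.slice tok (some 2) none) = false) :
    pvLoopA (tok :: rest) acc = pvLookA acc (PySem.Str.slice tok (some 2) none) rest := by
  cases rest with
  | nil =>
    simp only [pvLoopA, pvLookA, h1, h2, h3, Bool.not_true, Bool.not_false, Bool.false_eq_true, eq_self_iff_true, if_true, if_false]
  | cons next rest' =>
    simp only [pvLoopA, pvLookA, h1, h2, h3, Bool.not_true, Bool.not_false, Bool.false_eq_true, eq_self_iff_true, if_true, if_false]

-- B's fold, flushed, computes A's loop (first part: no pending key; second: pending key)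
lemma pvMain (l : List String) : ∀ (acc : List String),
    pvFlush (l.foldl pvStepB (acc, none)) = pvLoopA l acc ∧
    ∀ key, pvFlush (l.foldl pvStepB (acc, some key)) = pvLookA acc key l := by
  induction l with
  | nil =>
    intro acc
    refine ⟨?_, fun key => ?_⟩
    · simp only [List.foldl_nil, pvFlush, pvLoopA]
    · simp only [List.foldl_nil, pvFlush, pvLookA]
  | cons tok rest ih =>
    have main1 : ∀ acc, pvFlush ((tok :: rest).foldl pvStepB (acc, none)) = pvLoopA (tok :: rest) acc := by
      intro acc
      cases hs : PySem.Str.startswith tok "--" with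
      | true =>
        by_cases hk : PySem.Str.slice tok (some 2) none = ""
        · simp only [List.foldl_cons, pvStepB, pvProcB, pvLoopA, hs, hk, Bool.not_true, Bool.false_eq_true, eq_self_iff_true, if_true, if_false]
          exact (ih acc).1
        · cases he : PySem.Str.isIn "=" (PySem.Str.slice tok (some 2) none) with
          | true =>
            simp only [List.foldl_cons, pvStepB, pvProcB, pvLoopA, hs, hk, he, Bool.not_true, Bool.false_eq_true, eq_self_iff_true, if_true, if_false]
            exact (ih (acc ++ [PySem.Str.slice tok (some 2) none])).1
          | false =>
            rw [pvLoopA_lookahead acc tok rest hs hk he]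
            simp only [List.foldl_cons, pvStepB, pvProcB, hs, hk, he, Bool.not_true, Bool.false_eq_true, eq_self_iff_true, if_true, if_false]
            exact (ih acc).2 (PySem.Str.slice tok (some 2) none)
      | false =>
        cases he : PySem.Str.isIn "=" tok with
        | true =>
          simp only [List.foldl_cons, pvStepB, pvProcB, pvLoopA, hs, he, Bool.not_false, Bool.false_eq_true, eq_self_iff_true, if_true, if_false]
          exact (ih (acc ++ [tok])).1
        | false =>
          simp only [List.foldl_cons, pvStepB, pvProcB, pvLoopA, hs, he, Bool.not_false, Bool.false_eq_true, eq_self_iff_true, if_true, if_false]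
          exact (ih acc).1
    intro acc
    refine ⟨main1 acc, ?_⟩
    intro key
    cases hs : PySem.Str.startswith tok "--" with
    | true =>
      -- B emits key=true and re-processes tok, exactly A's i += 1 path
      have hswap : (tok :: rest).foldl pvStepB (acc, some key)
          = (tok :: rest).foldl pvStepB (acc ++ [pvFstr key "true"], none) := by
        simp only [List.foldl_cons, pvStepB, hs, Bool.not_true, Bool.false_eq_true, eq_self_iff_true, if_true, if_false]
      rw [hswap, main1]
      simp only [pvLookA, hs, Bool.not_true, Bool.false_eq_true, eq_self_iff_true, if_true, if_false]
    | false =>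
      simp only [List.foldl_cons, pvStepB, pvLookA, hs, Bool.not_false, Bool.false_eq_true, eq_self_iff_true, if_true, if_false]
      exact (ih (acc ++ [pvFstr key tok])).1

-- ===== VERDICT (by name: the statement is the Claim_ definition above) =====
theorem unknown_to_dotlist_py_spec : Claim_equal_unknown_to_dotlist_py := by
  intro unknown _
  unfold Spec_unknown_to_dotlist_py unknown_to_dotlist_py unknown_to_dotlist_py_alt
  exact ((pvMain unknown []).1).symm
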